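-- pv_equiv track=rewrite | github.com/daniel-reich/ubiquitous-fiesta | 9yk63KrKDHzNFWKBJ_6.py | is_it_inside
-- ===== SOURCE A (Python) =====
-- def is_it_inside(f,x,y):
--     if x==y:return True
--     l = f.get(y)
--     try:
--      if x in l:return True
--     except:
--         return False
--     for i in l:
--         if i in f.keys():
--             l2=[j for j in f.get(i)]
--             if x in l2:return True
--             for k in l2:
--               if k in f.keys():
--                  if x in f.get(k):return True
--     return False
-- ===== SOURCE B (Python) =====
-- def is_it_inside(f, x, y):
--     # Depth-limited BFS: simpler single loop over three levels instead of
--     # A's hand-unrolled nested loops.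
--     if x == y:
--         return True
--     if y not in f:
--         return False
--     frontier = f[y]
--     for _ in range(3):
--         if x in frontier:
--             return True
--         frontier = [n for u in frontier if u in f for n in f[u]]
--     return False
-- ===== Notes on version B (the rewrite author's own statement) =====
-- stated objective: simpler
-- what changed: Replaced the hand-unrolled two-level nested loops with a depth-limited BFS: one loop over three levels that checks membership in the current frontier and expands it via flatMap over keys.
import Mathlib
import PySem

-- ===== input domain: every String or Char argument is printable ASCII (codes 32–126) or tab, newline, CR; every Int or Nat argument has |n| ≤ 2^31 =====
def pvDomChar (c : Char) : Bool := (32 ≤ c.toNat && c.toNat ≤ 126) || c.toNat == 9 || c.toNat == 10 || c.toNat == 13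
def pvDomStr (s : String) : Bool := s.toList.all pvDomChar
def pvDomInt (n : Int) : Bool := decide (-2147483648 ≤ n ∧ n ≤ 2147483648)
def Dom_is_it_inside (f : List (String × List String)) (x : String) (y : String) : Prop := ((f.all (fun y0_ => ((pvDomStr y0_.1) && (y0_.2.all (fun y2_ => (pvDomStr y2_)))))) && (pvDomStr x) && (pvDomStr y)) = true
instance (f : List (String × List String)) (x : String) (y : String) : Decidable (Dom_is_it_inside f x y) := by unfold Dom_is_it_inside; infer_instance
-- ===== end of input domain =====

-- B re-implements A's hand-unrolled 3-level reachability check as a depth-limited BFS loop (simpler); same return value everywhere.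

-- ===== PORT A =====
-- literal transliteration of A: early returns become nested if/any over the same collections;
-- the try/except around 'x in l' fires exactly when f.get(y) is None (values are always lists here), i.e. get? = none.
def is_it_inside (f : List (String × List String)) (x : String) (y : String) : Bool :=
  if x == y then true
  else
    match (PySem.Dict.ofList f).get? y with
    | none => false   -- 'x in None' raises TypeError, caught: return False
    | some l =>
      if l.contains x then true
      else
        l.any (fun i =>
          match (PySem.Dict.ofList f).get? i with   -- 'if i in f.keys()' then l2 = f.get(i)
          | none => false
          | some l2 =>
            if l2.contains x then true
            else
              l2.any (fun k =>
                match (PySem.Dict.ofList f).get? k with   -- 'if k in f.keys()' then 'x in f.get(k)'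
                | none => false
                | some lk => lk.contains x))

-- ===== PORT B =====
-- one BFS level expansion: [n for u in frontier if u in f for n in f[u]]
def pvExpand (f : List (String × List String)) (frontier : List String) : List String :=
  frontier.flatMap (fun u =>
    match (PySem.Dict.ofList f).get? u with
    | some l => l
    | none => [])

-- the 'for _ in range(3)' loop of Source B
def pvBfs (f : List (String × List String)) (x : String) : Nat → List String → Bool
  | 0, _ => false
  | n+1, frontier =>
    if frontier.contains x then true
    else pvBfs f x n (pvExpand f frontier)

def is_it_inside_alt (f : List (String × List String)) (x : String) (y : String) : Bool :=
  if x == y then true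
  else
    match (PySem.Dict.ofList f).get? y with
    | none => false   -- 'y not in f'
    | some frontier => pvBfs f x 3 frontier

-- ===== PRECONDITION & SPEC =====
def Spec_is_it_inside (f : List (String × List String)) (x : String) (y : String) (out : Bool) : Prop := out = is_it_inside_alt f x y
instance (f : List (String × List String)) (x : String) (y : String) (out : Bool) : Decidable (Spec_is_it_inside f x y out) := by unfold Spec_is_it_inside; infer_instance

-- ===== CLAIM (what is proved, stated in full; the proofs are below) =====
def Claim_equal_is_it_inside : Prop := ∀ (f : List (String × List String)) (x : String) (y : String), Dom_is_it_inside f x y → Spec_is_it_inside f x y (is_it_inside f x y)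

-- ===== LEMMAS AND PROOFS =====

-- neighbour list of a node (empty if not a key); used only by the proofs below
def pvNbrs (f : List (String × List String)) (u : String) : List String :=
  match (PySem.Dict.ofList f).get? u with
  | some l => l
  | none => []

theorem pvBfs_succ (f : List (String × List String)) (x : String) (n : Nat) (fr : List String) :
    pvBfs f x (n+1) fr = if fr.contains x then true else pvBfs f x n (pvExpand f fr) := rfl

theorem pvBfs_zero (f : List (String × List String)) (x : String) (fr : List String) :
    pvBfs f x 0 fr = false := rfl

theorem pvExpand_eq (f : List (String × List String)) (fr : List String) :
    pvExpand f fr = fr.flatMap (pvNbrs f) := rfl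

theorem contains_flatMap' (l : List String) (g : String → List String) (x : String) :
    ((l.flatMap g).contains x) = l.any fun a => (g a).contains x := by
  induction l with
  | nil => rfl
  | cons a l ih => rw [List.flatMap_cons, List.contains_append, ih, List.any_cons]

theorem any_flatMap' (l : List String) (g : String → List String) (p : String → Bool) :
    ((l.flatMap g).any p) = l.any fun a => (g a).any p := by
  induction l with
  | nil => rfl
  | cons a l ih => rw [List.flatMap_cons, List.any_append, ih, List.any_cons]

theorem any_or_split (l : List String) (p q : String → Bool) :
    (l.any fun a => p a || q a) = (l.any p || l.any q) := by
  induction l with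
  | nil => rfl
  | cons a l ih =>
    simp only [List.any_cons, ih]
    cases p a <;> cases q a <;> cases l.any p <;> cases l.any q <;> rfl

-- ===== VERDICT (by name: the statement is the Claim_ definition above) =====
theorem is_it_inside_spec : Claim_equal_is_it_inside := by
  intro f x y _
  unfold Spec_is_it_inside is_it_inside is_it_inside_alt
  by_cases hxy : x == y
  · simp [hxy]
  · simp only [hxy, Bool.false_eq_true, if_false]
    cases hy : (PySem.Dict.ofList f).get? y with
    | none => rfl
    | some l =>
      dsimp only
      -- rewrite A's per-node body into pvNbrs form
      have hterm : ∀ i : String,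
          (match (PySem.Dict.ofList f).get? i with
           | none => false
           | some l2 =>
             if l2.contains x then true
             else l2.any fun k =>
               match (PySem.Dict.ofList f).get? k with
               | none => false
               | some lk => lk.contains x)
          = ((pvNbrs f i).contains x ||
              (pvNbrs f i).any fun k => (pvNbrs f k).contains x) := by
        intro i
        have hk : ∀ k : String,
            (match (PySem.Dict.ofList f).get? k with
             | none => false
             | some lk => lk.contains x) = (pvNbrs f k).contains x := by
          intro k; unfold pvNbrs; cases (PySem.Dict.ofList f).get? k <;> rfl
        cases h : (PySem.Dict.ofList f).get? i with
        | none => simp [pvNbrs, h]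
        | some l2 =>
          have hni : pvNbrs f i = l2 := by unfold pvNbrs; rw [h]
          rw [funext hk, hni]
          by_cases hx : l2.contains x <;> simp
      rw [funext hterm, pvBfs_succ, pvBfs_succ, pvBfs_succ, pvBfs_zero, pvExpand_eq,
        pvExpand_eq, contains_flatMap', contains_flatMap', any_flatMap']
      by_cases hc : l.contains x
      · rw [if_pos hc, if_pos hc]
      · rw [if_neg hc, if_neg hc, any_or_split]
        simp only [Bool.if_true_left, Bool.or_false, Bool.decide_coe]
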